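-- pv_equiv track=rewrite | github.com/baekjoon-algorithm/summer_algo | 112224/8주차/P_보석 쇼핑.py | solution
-- ===== SOURCE A (Python) =====
-- def solution(gems):
--     answer = []
--     n = len(gems)
--     kinds = len(set(gems))
--
--     now_contain = dict()
--     i, j = 0, 0
--     len_ans = n + 1
--     while i <= j < n:
--         key = gems[j]
--         if key in now_contain:
--             now_contain[key] += 1
--         else:
--             now_contain[key] = 1
--
--         while len(now_contain) == kinds:
--             if len_ans > j - i + 1:
--                 len_ans = j - i + 1
--                 answer = [i + 1, j + 1]
--             now_contain[gems[i]] -= 1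
--             if now_contain[gems[i]] == 0: del now_contain[gems[i]]
--             i += 1
--         j += 1
--
--     return answer
-- ===== SOURCE B (Python) =====
-- def solution(gems):
--     n = len(gems)
--     kinds = len(set(gems))
--     last = {}
--     len_ans = n + 1
--     answer = []
--     for j, g in enumerate(gems):
--         last[g] = j
--         if len(last) == kinds:
--             L = min(last.values())
--             if j - L + 1 < len_ans:
--                 len_ans = j - L + 1
--                 answer = [L + 1, j + 1]
--     return answer
-- ===== Notes on version B (the rewrite author's own statement) =====
-- stated objective: alternative
-- what changed: Replaces A's two-pointer sliding window with count dict and inner shrink loop by a single pass that keeps only each gem type's last occurrence index and takes the minimum of those indices as the window's left edge.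
import Mathlib
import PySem

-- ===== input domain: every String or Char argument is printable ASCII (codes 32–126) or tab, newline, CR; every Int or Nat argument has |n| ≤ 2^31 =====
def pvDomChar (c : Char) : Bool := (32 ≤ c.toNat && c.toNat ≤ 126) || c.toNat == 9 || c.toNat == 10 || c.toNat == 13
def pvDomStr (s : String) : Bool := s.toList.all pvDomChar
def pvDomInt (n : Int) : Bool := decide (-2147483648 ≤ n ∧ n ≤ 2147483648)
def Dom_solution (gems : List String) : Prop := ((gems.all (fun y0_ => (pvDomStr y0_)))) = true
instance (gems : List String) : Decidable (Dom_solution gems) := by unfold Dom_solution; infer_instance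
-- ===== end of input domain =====

-- B replaces A's two-pointer sliding window (count dict + inner shrink loop) by a single
-- pass keeping each gem type's last occurrence index; alternative decomposition, same results.

set_option maxHeartbeats 1000000


-- ===== PORT A =====
-- the inner 'while len(now_contain) == kinds' loop; the fuel (j+1 at the call site)
-- provably bounds its iteration count and the fuel-0 branch returns the state unchanged,
-- exactly like the loop's exit.  'now_contain[gems[i]] -= 1' is ported as an insert of
-- (getD - 1): the key is always present at that point of a real run.
def solutionShrink (gems : List String) (kinds j : Nat) :
    Nat → Nat → PySem.Dict String Int → Int → List Int →
      Nat × PySem.Dict String Int × Int × List Int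
  | 0, i, d, lenAns, ans => (i, d, lenAns, ans)
  | fuel+1, i, d, lenAns, ans =>
    if d.size = kinds then
      let st := if lenAns > (j : Int) - (i : Int) + 1
                then (((j : Int) - (i : Int) + 1), ([(i : Int) + 1, (j : Int) + 1] : List Int))
                else (lenAns, ans)
      let g := gems.getD i ""
      let d1 := d.insert g (d.getD g 0 - 1)
      let d2 := if d1.getD g 0 = 0 then d1.erase g else d1
      solutionShrink gems kinds j fuel (i+1) d2 st.1 st.2
    else (i, d, lenAns, ans)

-- the outer 'while i <= j < n' loop; j increases by one per iteration, fuel starts at n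
def solutionOuter (gems : List String) (kinds n : Nat) :
    Nat → Nat → Nat → PySem.Dict String Int → Int → List Int → List Int
  | 0, _, _, _, _, ans => ans
  | fuel+1, i, j, d, lenAns, ans =>
    if i ≤ j ∧ j < n then
      let d' := if d.contains (gems.getD j "") then
                  d.insert (gems.getD j "") (d.getD (gems.getD j "") 0 + 1)
                else d.insert (gems.getD j "") 1
      let r := solutionShrink gems kinds j (j+1) i d' lenAns ans
      solutionOuter gems kinds n fuel r.1 (j+1) r.2.1 r.2.2.1 r.2.2.2
    else ans

def solution (gems : List String) : List Int :=
  let n := gems.length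
  let kinds := (PySem.Set.ofList gems).length
  solutionOuter gems kinds n n 0 0 PySem.Dict.empty ((n : Int) + 1) []

-- ===== PORT B =====
-- one enumerate pass; last maps each gem type to its most recent index and
-- min(last.values()) is the window's left edge.  The 'none' branch of the match is
-- unreachable (the dict is nonempty whenever its size equals kinds ≥ 1) and only
-- makes the match total.
def solutionAltStep (kinds : Nat)
    (st : PySem.Dict String Int × Int × List Int) (p : Int × String) :
    PySem.Dict String Int × Int × List Int :=
  let last := st.1.insert p.2 p.1
  if last.size = kinds then
    match PySem.List.min? last.values (fun y => y) with
    | some L =>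
        if p.1 - L + 1 < st.2.1 then (last, p.1 - L + 1, [L + 1, p.1 + 1])
        else (last, st.2.1, st.2.2)
    | none => (last, st.2.1, st.2.2)
  else (last, st.2.1, st.2.2)

def solution_alt (gems : List String) : List Int :=
  let n := gems.length
  let kinds := (PySem.Set.ofList gems).length
  ((PySem.List.enumerate gems).foldl (solutionAltStep kinds)
      (PySem.Dict.empty, (n : Int) + 1, [])).2.2

-- ===== PRECONDITION & SPEC =====
def Spec_solution (gems : List String) (out : List Int) : Prop := out = solution_alt gems
instance (gems : List String) (out : List Int) : Decidable (Spec_solution gems out) := by unfold Spec_solution; infer_instance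

-- ===== CLAIM (what is proved, stated in full; the proofs are below) =====
def Claim_equal_solution : Prop := ∀ (gems : List String), Dom_solution gems → Spec_solution gems (solution gems)

-- ===== LEMMAS AND PROOFS =====

-- the window gems[i:j], coverage of all gem kinds, last occurrence before j
def pvWin (gems : List String) (i j : Nat) : List String := (gems.take j).drop i

def pvCovers (gems w : List String) : Prop := ∀ k ∈ gems, k ∈ w

def pvLast? (gems : List String) (j : Nat) (k : String) : Option Nat :=
  ((List.range j).filter (fun m => gems.getD m "" == k)).max?

-- A's count-dict invariant over its window; B's last-occurrence invariant
def pvCnt (gems : List String) (i j : Nat) (d : PySem.Dict String Int) : Prop :=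
  ∀ k, d.get? k = if 0 < (pvWin gems i j).count k
                  then some (((pvWin gems i j).count k : Int)) else none

def pvLastInv (gems : List String) (j : Nat) (last : PySem.Dict String Int) : Prop :=
  ∀ k, last.get? k = (pvLast? gems j k).map (fun m => (m : Int))

theorem mem_pvWin {gems : List String} {i j : Nat} {k : String} :
    k ∈ pvWin gems i j ↔ ∃ m, i ≤ m ∧ m < j ∧ m < gems.length ∧ gems.getD m "" = k := by
  unfold pvWin
  constructor
  · intro h
    obtain ⟨idx, hlt, heq⟩ := List.mem_iff_getElem.1 h
    have hlen : ((gems.take j).drop i).length = min j gems.length - i := by simp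
    refine ⟨i + idx, by omega, by omega, by omega, ?_⟩
    rw [List.getElem_drop, List.getElem_take] at heq
    rw [List.getD_eq_getElem gems "" (by omega)]
    exact heq
  · rintro ⟨m, h1, h2, h3, h4⟩
    have hm : m = i + (m - i) := by omega
    rw [hm] at h4
    rw [List.mem_iff_getElem]
    refine ⟨m - i, by simp; omega, ?_⟩
    rw [List.getElem_drop, List.getElem_take]
    rw [List.getD_eq_getElem gems "" (by omega)] at h4
    exact h4

theorem mem_take_iff {gems : List String} {j : Nat} {k : String} :
    k ∈ gems.take j ↔ ∃ m, m < j ∧ m < gems.length ∧ gems.getD m "" = k := by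
  have h := mem_pvWin (gems := gems) (i := 0) (j := j) (k := k)
  unfold pvWin at h
  rw [List.drop_zero] at h
  rw [h]
  constructor
  · rintro ⟨m, _, h2, h3, h4⟩; exact ⟨m, h2, h3, h4⟩
  · rintro ⟨m, h2, h3, h4⟩; exact ⟨m, Nat.zero_le m, h2, h3, h4⟩

theorem pvCovers_mono {gems : List String} {i j : Nat}
    (h : pvCovers gems (pvWin gems i j)) : pvCovers gems (pvWin gems i (j+1)) := by
  intro k hk
  obtain ⟨m, h1, h2, h3, h4⟩ := mem_pvWin.1 (h k hk)
  exact mem_pvWin.2 ⟨m, h1, by omega, h3, h4⟩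

theorem pvCovers_take {gems : List String} {i j : Nat}
    (h : pvCovers gems (pvWin gems i j)) : pvCovers gems (gems.take j) := by
  intro k hk
  obtain ⟨m, _, h2, h3, h4⟩ := mem_pvWin.1 (h k hk)
  exact mem_take_iff.2 ⟨m, h2, h3, h4⟩

theorem pvLast?_succ (gems : List String) (j : Nat) (k : String) :
    pvLast? gems (j+1) k
      = if gems.getD j "" = k then some j else pvLast? gems j k := by
  unfold pvLast?
  rw [List.range_succ, List.filter_append]
  by_cases hp : gems.getD j "" = k
  · rw [if_pos hp]
    have hfil : List.filter (fun m => gems.getD m "" == k) [j] = [j] := by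
      rw [List.filter_cons, if_pos (by simp only [beq_iff_eq]; exact hp)]
      rfl
    rw [hfil]
    apply List.max?_eq_some_iff.2
    constructor
    · exact List.mem_append_right _ (by simp)
    · intro b hb
      rcases List.mem_append.1 hb with hb | hb
      · have := List.mem_range.1 (List.mem_of_mem_filter hb)
        omega
      · simp at hb; omega
  · rw [if_neg hp]
    have hfil : List.filter (fun m => gems.getD m "" == k) [j] = [] := by
      rw [List.filter_cons, if_neg (by simp only [beq_iff_eq]; exact hp)]
      rfl
    rw [hfil, List.append_nil]

theorem pvLast?_eq_none_iff {gems : List String} {j : Nat} {k : String} (hj : j ≤ gems.length) :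
    pvLast? gems j k = none ↔ k ∉ gems.take j := by
  unfold pvLast?
  rw [List.max?_eq_none_iff, List.filter_eq_nil_iff, mem_take_iff]
  constructor
  · intro h hmem
    obtain ⟨m, h1, h2, h3⟩ := hmem
    have h4 := h m (List.mem_range.2 h1)
    exact h4 (by simp only [beq_iff_eq]; exact h3)
  · intro h m hm
    have hmj := List.mem_range.1 hm
    simp only [beq_iff_eq]
    intro heq
    exact h ⟨m, hmj, by omega, heq⟩

theorem pvLast?_spec {gems : List String} {j : Nat} {k : String} {m : Nat}
    (hj : j ≤ gems.length) (h : pvLast? gems j k = some m) :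
    m < j ∧ m < gems.length ∧ gems.getD m "" = k ∧
      ∀ m', m' < j → gems.getD m' "" = k → m' ≤ m := by
  unfold pvLast? at h
  obtain ⟨hmem, hub⟩ := List.max?_eq_some_iff.1 h
  have hmr := List.mem_range.1 (List.mem_of_mem_filter hmem)
  have hmk : gems.getD m "" = k := by
    have := List.of_mem_filter hmem; simpa using this
  refine ⟨hmr, by omega, hmk, ?_⟩
  intro m' h1 h2
  exact hub m' (List.mem_filter.2 ⟨List.mem_range.2 h1, by simp only [beq_iff_eq]; exact h2⟩)

-- |keys| equals |set(gems)| iff the witnessed collection covers every kind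
theorem pvSize_iff (gems keys w : List String) (hnd : keys.Nodup)
    (hw : ∀ k ∈ w, k ∈ gems) (hmem : ∀ k, k ∈ keys ↔ k ∈ w) :
    keys.length = (PySem.Set.ofList gems).length ↔ pvCovers gems w := by
  have hSnd : (PySem.Set.ofList gems).Nodup := PySem.Set.nodup_ofList gems
  have hsub : keys.toFinset ⊆ (PySem.Set.ofList gems).toFinset := by
    intro k hk
    rw [List.mem_toFinset] at *
    exact (PySem.Set.mem_ofList gems k).2 (hw _ ((hmem k).1 hk))
  have hck : keys.toFinset.card = keys.length := List.toFinset_card_of_nodup hnd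
  have hcS : (PySem.Set.ofList gems).toFinset.card = (PySem.Set.ofList gems).length :=
    List.toFinset_card_of_nodup hSnd
  constructor
  · intro hlen k hkg
    have heq : keys.toFinset = (PySem.Set.ofList gems).toFinset :=
      Finset.eq_of_subset_of_card_le hsub (by omega)
    have hin : k ∈ keys.toFinset := by
      rw [heq, List.mem_toFinset]
      exact (PySem.Set.mem_ofList gems k).2 hkg
    exact (hmem k).1 (List.mem_toFinset.1 hin)
  · intro hcov
    have hsub2 : (PySem.Set.ofList gems).toFinset ⊆ keys.toFinset := by
      intro k hk
      rw [List.mem_toFinset] at *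
      exact (hmem k).2 (hcov k ((PySem.Set.mem_ofList gems k).1 hk))
    have heq : keys.toFinset = (PySem.Set.ofList gems).toFinset :=
      Finset.Subset.antisymm hsub hsub2
    rw [← hck, ← hcS, heq]

theorem pvDict_size_keys (d : PySem.Dict String Int) : d.size = d.keys.length := by
  simp [PySem.Dict.size, PySem.Dict.keys]

theorem covers_size (gems : List String) (w : List String) (d : PySem.Dict String Int)
    (hnd : d.keys.Nodup) (hw : ∀ k ∈ w, k ∈ gems)
    (hget : ∀ k, (d.get? k).isSome ↔ k ∈ w) :
    (d.size = (PySem.Set.ofList gems).length ↔ pvCovers gems w) := by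
  rw [pvDict_size_keys]
  apply pvSize_iff gems d.keys w hnd hw
  intro k
  rw [← hget k]
  constructor
  · intro hk
    rcases h : d.get? k with _ | v
    · exact absurd ((PySem.Dict.get?_eq_none_iff_not_mem_keys d k).1 h) (by simp [hk])
    · simp
  · intro hk
    by_contra hmem
    have hn := (PySem.Dict.get?_eq_none_iff_not_mem_keys d k).2 hmem
    rw [hn] at hk
    simp at hk

theorem pvCnt_size_iff {gems : List String} {i j : Nat} {d : PySem.Dict String Int}
    (hnd : d.keys.Nodup) (hd : pvCnt gems i j d) :
    (d.size = (PySem.Set.ofList gems).length ↔ pvCovers gems (pvWin gems i j)) := by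
  refine covers_size gems (pvWin gems i j) d hnd ?_ ?_
  · intro k hk
    obtain ⟨m, _, _, hmn, hmk⟩ := mem_pvWin.1 hk
    rw [List.getD_eq_getElem gems "" hmn] at hmk
    exact hmk ▸ List.getElem_mem hmn
  · intro k
    rw [hd k]
    by_cases h : 0 < (pvWin gems i j).count k
    · simp [h, List.count_pos_iff.1 h]
    · simp only [if_neg h]
      simp only [Option.isSome_none, Bool.false_eq_true, false_iff]
      intro hmem
      exact h (List.count_pos_iff.2 hmem)

theorem pvLast_size_iff {gems : List String} {j : Nat} {last : PySem.Dict String Int}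
    (hj : j ≤ gems.length) (hnd : last.keys.Nodup) (hl : pvLastInv gems j last) :
    (last.size = (PySem.Set.ofList gems).length ↔ pvCovers gems (gems.take j)) := by
  refine covers_size gems (gems.take j) last hnd ?_ ?_
  · intro k hk
    exact (List.take_sublist j gems).subset hk
  · intro k
    rw [hl k]
    rcases h : pvLast? gems j k with _ | m
    · simp [(pvLast?_eq_none_iff hj).1 h]
    · obtain ⟨h1, h2, h3, _⟩ := pvLast?_spec hj h
      simp [mem_take_iff.2 ⟨m, h1, h2, h3⟩]

-- erase: removing one key leaves all other lookups unchanged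
theorem pv_find?_filter_ne (k k' : String) (l : List (String × Int)) :
    (l.filter (fun p => !(p.1 == k))).find? (fun p => p.1 == k')
      = if k' = k then none else l.find? (fun p => p.1 == k') := by
  induction l with
  | nil => simp
  | cons p l ih =>
    rw [List.filter_cons]
    by_cases hpk : p.1 = k
    · rw [if_neg (by simp [hpk])]
      rw [ih]
      by_cases hk : k' = k
      · rw [if_pos hk, if_pos hk]
      · rw [if_neg hk, if_neg hk,
            List.find?_cons_of_neg (by simp only [beq_iff_eq, hpk]; exact fun h => hk h.symm)]
    · rw [if_pos (by simp [hpk])]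
      by_cases hpk' : p.1 = k'
      · have hkk' : ¬ k' = k := fun h => hpk (by rw [hpk', h])
        rw [if_neg hkk']
        rw [List.find?_cons_of_pos (by simp only [beq_iff_eq]; exact hpk'),
            List.find?_cons_of_pos (by simp only [beq_iff_eq]; exact hpk')]
      · rw [List.find?_cons_of_neg (by simp only [beq_iff_eq]; exact hpk'), ih]
        by_cases hk : k' = k
        · rw [if_pos hk, if_pos hk]
        · rw [if_neg hk, if_neg hk,
              List.find?_cons_of_neg (by simp only [beq_iff_eq]; exact hpk')]

theorem pvDict_get?_erase (d : PySem.Dict String Int) (k k' : String) :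
    (d.erase k).get? k' = if k' = k then none else d.get? k' := by
  rw [show (d.erase k).get? k'
      = ((d.items.filter (fun p => !(p.1 == k))).find? (fun p => p.1 == k')).map (fun x => x.2)
    from rfl]
  rw [pv_find?_filter_ne]
  by_cases hk : k' = k
  · rw [if_pos hk, if_pos hk]
    rfl
  · rw [if_neg hk, if_neg hk]
    rfl

theorem pvDict_nodup_erase (d : PySem.Dict String Int) (k : String) (h : d.keys.Nodup) :
    (d.erase k).keys.Nodup := by
  have hsub : (d.items.filter (fun p => !(p.1 == k))).Sublist d.items := List.filter_sublist
  have hsub2 : ((d.items.filter (fun p => !(p.1 == k))).map (fun p => p.1)).Sublist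
      (d.items.map (fun p => p.1)) := hsub.map _
  exact h.sublist (show (d.erase k).keys.Sublist d.keys from hsub2)

-- window decompositions
theorem pvWin_succ_right {gems : List String} {i j : Nat} (hjn : j < gems.length) (hij : i ≤ j) :
    pvWin gems i (j+1) = pvWin gems i j ++ [gems.getD j ""] := by
  unfold pvWin
  rw [List.take_succ, List.getElem?_eq_getElem hjn]
  rw [List.drop_append_of_le_length (by simp; omega)]
  rw [List.getD_eq_getElem gems "" hjn]
  rfl

theorem pvWin_cons {gems : List String} {i j : Nat} (hij : i ≤ j) (hjn : j < gems.length) :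
    pvWin gems i (j+1) = gems.getD i "" :: pvWin gems (i+1) (j+1) := by
  unfold pvWin
  have hlen : i < (gems.take (j+1)).length := by simp; omega
  rw [List.drop_eq_getElem_cons hlen, List.getElem_take]
  rw [List.getD_eq_getElem gems "" (by omega)]

-- the outer count update: gems[j] joins the window on the right
theorem pvCnt_add {gems : List String} {i j : Nat} {d : PySem.Dict String Int}
    (hjn : j < gems.length) (hij : i ≤ j) (hd : pvCnt gems i j d) :
    pvCnt gems i (j+1)
      (if d.contains (gems.getD j "") then
        d.insert (gems.getD j "") (d.getD (gems.getD j "") 0 + 1)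
       else d.insert (gems.getD j "") 1) := by
  have hwin : pvWin gems i (j+1) = pvWin gems i j ++ [gems.getD j ""] := pvWin_succ_right hjn hij
  have hcont : d.contains (gems.getD j "") = true ↔ 0 < (pvWin gems i j).count (gems.getD j "") := by
    rw [PySem.Dict.contains_eq_isSome_get?, hd (gems.getD j "")]
    by_cases h : 0 < (pvWin gems i j).count (gems.getD j "") <;> simp [h]
  intro k
  have hcnt : (pvWin gems i (j+1)).count k
      = (pvWin gems i j).count k + if gems.getD j "" = k then 1 else 0 := by
    rw [hwin, List.count_append]
    by_cases h : gems.getD j "" = k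
    · simp [List.count_cons, h]
    · simp [List.count_cons, h]
  by_cases hc : d.contains (gems.getD j "") = true
  · rw [if_pos hc, PySem.Dict.get?_insert]
    by_cases hk : k = gems.getD j ""
    · subst hk
      have hpos := hcont.1 hc
      have hgd : d.getD (gems.getD j "") 0 = ((pvWin gems i j).count (gems.getD j "") : Int) := by
        rw [PySem.Dict.getD_eq_get?_getD, hd (gems.getD j ""), if_pos hpos]
        rfl
      have hcc : (pvWin gems i (j+1)).count (gems.getD j "")
          = (pvWin gems i j).count (gems.getD j "") + 1 := by
        rw [hcnt, if_pos rfl]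
      rw [if_pos rfl, hgd, hcc, if_pos (by omega)]
      exact congrArg some (by push_cast; ring)
    · have hceq : (pvWin gems i (j+1)).count k = (pvWin gems i j).count k := by
        rw [hcnt, if_neg (fun h => hk h.symm)]
        omega
      rw [if_neg hk, hd k, hceq]
  · rw [if_neg hc, PySem.Dict.get?_insert]
    by_cases hk : k = gems.getD j ""
    · subst hk
      have hz : (pvWin gems i j).count (gems.getD j "") = 0 := by
        by_contra h
        exact hc (hcont.2 (by omega))
      have hcc : (pvWin gems i (j+1)).count (gems.getD j "") = 1 := by
        rw [hcnt, if_pos rfl, hz]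
      rw [if_pos rfl, hcc, if_pos (by omega)]
      norm_num
    · have hceq : (pvWin gems i (j+1)).count k = (pvWin gems i j).count k := by
        rw [hcnt, if_neg (fun h => hk h.symm)]
        omega
      rw [if_neg hk, hd k, hceq]

-- the shrink-step count update: gems[i] leaves the window on the left
theorem pvCnt_dec {gems : List String} {i j : Nat} {d : PySem.Dict String Int}
    (hij : i ≤ j) (hjn : j < gems.length) (hd : pvCnt gems i (j+1) d) (hnd : d.keys.Nodup) :
    pvCnt gems (i+1) (j+1)
        (if (d.insert (gems.getD i "") (d.getD (gems.getD i "") 0 - 1)).getD (gems.getD i "") 0 = 0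
         then (d.insert (gems.getD i "") (d.getD (gems.getD i "") 0 - 1)).erase (gems.getD i "")
         else d.insert (gems.getD i "") (d.getD (gems.getD i "") 0 - 1)) ∧
    ((if (d.insert (gems.getD i "") (d.getD (gems.getD i "") 0 - 1)).getD (gems.getD i "") 0 = 0
      then (d.insert (gems.getD i "") (d.getD (gems.getD i "") 0 - 1)).erase (gems.getD i "")
      else d.insert (gems.getD i "") (d.getD (gems.getD i "") 0 - 1)).keys.Nodup) := by
  have hmem : gems.getD i "" ∈ pvWin gems i (j+1) :=
    mem_pvWin.2 ⟨i, le_refl i, by omega, by omega, rfl⟩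
  have hCpos : 0 < (pvWin gems i (j+1)).count (gems.getD i "") := List.count_pos_iff.2 hmem
  have hgetg : d.get? (gems.getD i "") = some (((pvWin gems i (j+1)).count (gems.getD i "") : Int)) := by
    rw [hd (gems.getD i ""), if_pos hCpos]
  have hgetD : d.getD (gems.getD i "") 0 = ((pvWin gems i (j+1)).count (gems.getD i "") : Int) := by
    rw [PySem.Dict.getD_eq_get?_getD, hgetg]
    rfl
  have hcnt : ∀ k, (pvWin gems i (j+1)).count k
      = (pvWin gems (i+1) (j+1)).count k + if gems.getD i "" = k then 1 else 0 := by
    intro k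
    rw [pvWin_cons hij hjn, List.count_cons]
    by_cases h : gems.getD i "" = k
    · simp [h]
    · simp [h]
  have hd1getD : (d.insert (gems.getD i "") (d.getD (gems.getD i "") 0 - 1)).getD (gems.getD i "") 0
      = ((pvWin gems i (j+1)).count (gems.getD i "") : Int) - 1 := by
    rw [PySem.Dict.getD_eq_get?_getD, PySem.Dict.get?_insert, if_pos rfl, hgetD]
    rfl
  by_cases hC1 : (pvWin gems i (j+1)).count (gems.getD i "") = 1
  · have hz : (d.insert (gems.getD i "") (d.getD (gems.getD i "") 0 - 1)).getD (gems.getD i "") 0 = 0 := by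
      rw [hd1getD, hC1]
      norm_num
    rw [if_pos hz]
    constructor
    · intro k
      rw [pvDict_get?_erase]
      by_cases hk : k = gems.getD i ""
      · subst hk
        have hz2 : (pvWin gems (i+1) (j+1)).count (gems.getD i "") = 0 := by
          have h2 := hcnt (gems.getD i "")
          rw [if_pos rfl] at h2
          omega
        rw [if_pos rfl, hz2]
        simp
      · have hceq : (pvWin gems (i+1) (j+1)).count k = (pvWin gems i (j+1)).count k := by
          have h2 := hcnt k
          rw [if_neg (fun h => hk h.symm)] at h2
          omega
        rw [if_neg hk, PySem.Dict.get?_insert, if_neg hk, hd k, hceq]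
    · exact pvDict_nodup_erase _ _ (PySem.Dict.nodup_keys_insert _ _ _ hnd)
  · have hC2 : 2 ≤ (pvWin gems i (j+1)).count (gems.getD i "") := by omega
    have hz : ¬ (d.insert (gems.getD i "") (d.getD (gems.getD i "") 0 - 1)).getD (gems.getD i "") 0 = 0 := by
      rw [hd1getD]
      intro h
      have hcast : ((pvWin gems i (j+1)).count (gems.getD i "") : Int) = 1 := by omega
      omega
    rw [if_neg hz]
    constructor
    · intro k
      rw [PySem.Dict.get?_insert]
      by_cases hk : k = gems.getD i ""
      · subst hk
        have hval : (pvWin gems (i+1) (j+1)).count (gems.getD i "")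
            = (pvWin gems i (j+1)).count (gems.getD i "") - 1 := by
          have h2 := hcnt (gems.getD i "")
          rw [if_pos rfl] at h2
          omega
        rw [if_pos rfl, hval, if_pos (by omega), hgetD]
        exact congrArg some (by
          push_cast [Nat.cast_sub (by omega : 1 ≤ (pvWin gems i (j+1)).count (gems.getD i ""))]
          ring)
      · have hceq : (pvWin gems (i+1) (j+1)).count k = (pvWin gems i (j+1)).count k := by
          have h2 := hcnt k
          rw [if_neg (fun h => hk h.symm)] at h2
          omega
        rw [if_neg hk, hd k, hceq]
    · exact PySem.Dict.nodup_keys_insert _ _ _ hnd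

theorem shrink_stop (gems : List String) (kinds j i : Nat) (d : PySem.Dict String Int)
    (lenAns : Int) (ans : List Int) (h : ¬ d.size = kinds) :
    ∀ fuel, solutionShrink gems kinds j fuel i d lenAns ans = (i, d, lenAns, ans) := by
  intro fuel
  cases fuel with
  | zero => rfl
  | succ f => simp [solutionShrink, h]

theorem pvLastInv_step {gems : List String} {j : Nat} {last : PySem.Dict String Int}
    (hl : pvLastInv gems j last) :
    pvLastInv gems (j+1) (last.insert (gems.getD j "") (j : Int)) := by
  intro k
  rw [PySem.Dict.get?_insert, pvLast?_succ]
  by_cases hk : k = gems.getD j ""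
  · rw [if_pos hk, if_pos hk.symm]
    rfl
  · rw [if_neg hk, if_neg (fun h => hk h.symm), hl k]

theorem pvKindsPos {gems : List String} (hne : gems ≠ []) :
    0 < (PySem.Set.ofList gems).length := by
  cases gems with
  | nil => exact absurd rfl hne
  | cons g t =>
    have hg : g ∈ PySem.Set.ofList (g :: t) :=
      (PySem.Set.mem_ofList (g :: t) g).2 List.mem_cons_self
    exact List.length_pos_of_mem hg

-- the inner shrink loop ends at L+1 and its records collapse to the best (last) candidate
theorem shrink_spec (gems : List String) (j L : Nat)
    (hLj : L ≤ j) (hjn : j < gems.length)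
    (hcov : ∀ m : Nat, pvCovers gems (pvWin gems m (j+1)) ↔ m ≤ L) :
    ∀ fuel i (d : PySem.Dict String Int) (lenAns : Int) (ans : List Int),
      i ≤ L → L + 1 - i ≤ fuel → d.keys.Nodup → pvCnt gems i (j+1) d →
      ∃ d', solutionShrink gems ((PySem.Set.ofList gems).length) j fuel i d lenAns ans
            = (L+1, d',
               if lenAns > (j : Int) - (L : Int) + 1
               then (((j : Int) - (L : Int) + 1, ([(L : Int) + 1, (j : Int) + 1] : List Int)) : Int × List Int)
               else (lenAns, ans))
          ∧ d'.keys.Nodup ∧ pvCnt gems (L+1) (j+1) d' := by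
  intro fuel
  induction fuel with
  | zero =>
    intro i d lenAns ans hiL hfuel _ _
    omega
  | succ fuel ih =>
    intro i d lenAns ans hiL hfuel hnd hd
    have hij : i ≤ j := le_trans hiL hLj
    have hsz : d.size = (PySem.Set.ofList gems).length :=
      (pvCnt_size_iff hnd hd).2 ((hcov i).2 hiL)
    obtain ⟨hdec, hnd2⟩ := pvCnt_dec hij hjn hd hnd
    rcases Nat.lt_or_ge i L with hlt | hge
    · -- i < L : more iterations follow
      by_cases hI : lenAns > (j : Int) - (i : Int) + 1
      · have hstep : solutionShrink gems ((PySem.Set.ofList gems).length) j (fuel+1) i d lenAns ans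
            = solutionShrink gems ((PySem.Set.ofList gems).length) j fuel (i+1)
                (if (d.insert (gems.getD i "") (d.getD (gems.getD i "") 0 - 1)).getD (gems.getD i "") 0 = 0
                 then (d.insert (gems.getD i "") (d.getD (gems.getD i "") 0 - 1)).erase (gems.getD i "")
                 else d.insert (gems.getD i "") (d.getD (gems.getD i "") 0 - 1))
                ((j : Int) - (i : Int) + 1) ([(i : Int) + 1, (j : Int) + 1]) := by
          simp only [solutionShrink]
          rw [if_pos hsz, if_pos hI]
        obtain ⟨d', ih_eq, hnd', hcnt'⟩ :=
          ih (i+1) _ ((j : Int) - (i : Int) + 1) ([(i : Int) + 1, (j : Int) + 1])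
            (by omega) (by omega) hnd2 hdec
        refine ⟨d', ?_, hnd', hcnt'⟩
        rw [hstep, ih_eq]
        have hclt : (j : Int) - (L : Int) + 1 < (j : Int) - (i : Int) + 1 := by
          have hcast : (i : Int) < (L : Int) := by exact_mod_cast hlt
          omega
        rw [if_pos (show (j : Int) - (i : Int) + 1 > (j : Int) - (L : Int) + 1 from hclt),
            if_pos (show lenAns > (j : Int) - (L : Int) + 1 by omega)]
      · have hstep : solutionShrink gems ((PySem.Set.ofList gems).length) j (fuel+1) i d lenAns ans
            = solutionShrink gems ((PySem.Set.ofList gems).length) j fuel (i+1)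
                (if (d.insert (gems.getD i "") (d.getD (gems.getD i "") 0 - 1)).getD (gems.getD i "") 0 = 0
                 then (d.insert (gems.getD i "") (d.getD (gems.getD i "") 0 - 1)).erase (gems.getD i "")
                 else d.insert (gems.getD i "") (d.getD (gems.getD i "") 0 - 1))
                lenAns ans := by
          simp only [solutionShrink]
          rw [if_pos hsz, if_neg hI]
        obtain ⟨d', ih_eq, hnd', hcnt'⟩ := ih (i+1) _ lenAns ans (by omega) (by omega) hnd2 hdec
        refine ⟨d', ?_, hnd', hcnt'⟩
        rw [hstep, ih_eq]
    · -- i = L : last iteration, the following size check fails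
      have hiL' : i = L := le_antisymm hiL hge
      subst hiL'
      have hnc : ¬ ((if (d.insert (gems.getD i "") (d.getD (gems.getD i "") 0 - 1)).getD (gems.getD i "") 0 = 0
                 then (d.insert (gems.getD i "") (d.getD (gems.getD i "") 0 - 1)).erase (gems.getD i "")
                 else d.insert (gems.getD i "") (d.getD (gems.getD i "") 0 - 1)).size
              = (PySem.Set.ofList gems).length) := by
        intro h
        have hcv := (pvCnt_size_iff hnd2 hdec).1 h
        have := (hcov (i+1)).1 hcv
        omega
      by_cases hI : lenAns > (j : Int) - (i : Int) + 1
      · have hstep : solutionShrink gems ((PySem.Set.ofList gems).length) j (fuel+1) i d lenAns ans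
            = solutionShrink gems ((PySem.Set.ofList gems).length) j fuel (i+1)
                (if (d.insert (gems.getD i "") (d.getD (gems.getD i "") 0 - 1)).getD (gems.getD i "") 0 = 0
                 then (d.insert (gems.getD i "") (d.getD (gems.getD i "") 0 - 1)).erase (gems.getD i "")
                 else d.insert (gems.getD i "") (d.getD (gems.getD i "") 0 - 1))
                ((j : Int) - (i : Int) + 1) ([(i : Int) + 1, (j : Int) + 1]) := by
          simp only [solutionShrink]
          rw [if_pos hsz, if_pos hI]
        refine ⟨_, ?_, hnd2, hdec⟩
        rw [hstep, shrink_stop _ _ _ _ _ _ _ hnc fuel, if_pos hI]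
      · have hstep : solutionShrink gems ((PySem.Set.ofList gems).length) j (fuel+1) i d lenAns ans
            = solutionShrink gems ((PySem.Set.ofList gems).length) j fuel (i+1)
                (if (d.insert (gems.getD i "") (d.getD (gems.getD i "") 0 - 1)).getD (gems.getD i "") 0 = 0
                 then (d.insert (gems.getD i "") (d.getD (gems.getD i "") 0 - 1)).erase (gems.getD i "")
                 else d.insert (gems.getD i "") (d.getD (gems.getD i "") 0 - 1))
                lenAns ans := by
          simp only [solutionShrink]
          rw [if_pos hsz, if_neg hI]
        refine ⟨_, ?_, hnd2, hdec⟩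
        rw [hstep, shrink_stop _ _ _ _ _ _ _ hnc fuel, if_neg hI]

theorem outer_step (gems : List String) (kinds n fuel i j : Nat) (d : PySem.Dict String Int)
    (lenAns : Int) (ans : List Int) (h : i ≤ j ∧ j < n) :
    solutionOuter gems kinds n (fuel+1) i j d lenAns ans
      = solutionOuter gems kinds n fuel
          (solutionShrink gems kinds j (j+1) i
            (if d.contains (gems.getD j "") then
               d.insert (gems.getD j "") (d.getD (gems.getD j "") 0 + 1)
             else d.insert (gems.getD j "") 1) lenAns ans).1
          (j+1)
          (solutionShrink gems kinds j (j+1) i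
            (if d.contains (gems.getD j "") then
               d.insert (gems.getD j "") (d.getD (gems.getD j "") 0 + 1)
             else d.insert (gems.getD j "") 1) lenAns ans).2.1
          (solutionShrink gems kinds j (j+1) i
            (if d.contains (gems.getD j "") then
               d.insert (gems.getD j "") (d.getD (gems.getD j "") 0 + 1)
             else d.insert (gems.getD j "") 1) lenAns ans).2.2.1
          (solutionShrink gems kinds j (j+1) i
            (if d.contains (gems.getD j "") then
               d.insert (gems.getD j "") (d.getD (gems.getD j "") 0 + 1)
             else d.insert (gems.getD j "") 1) lenAns ans).2.2.2 := by
  simp only [solutionOuter]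
  rw [if_pos h]

-- the main coupled induction: A's outer loop equals B's fold over the remaining gems
theorem outer_main (gems : List String) (hne : gems ≠ []) :
    ∀ fuel j i (d : PySem.Dict String Int) (lenAns : Int) (ans : List Int)
      (last : PySem.Dict String Int),
      fuel + j = gems.length →
      i ≤ j →
      d.keys.Nodup → pvCnt gems i j d →
      ¬ pvCovers gems (pvWin gems i j) →
      (i = 0 ∨ pvCovers gems (pvWin gems (i-1) j)) →
      (pvCovers gems (gems.take j) → lenAns ≤ (j : Int) - (i : Int) + 1) →
      last.keys.Nodup → pvLastInv gems j last →
      solutionOuter gems ((PySem.Set.ofList gems).length) gems.length fuel i j d lenAns ans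
        = ((PySem.List.enumerate (gems.drop j) (j : Int)).foldl
            (solutionAltStep ((PySem.Set.ofList gems).length)) (last, lenAns, ans)).2.2 := by
  intro fuel
  induction fuel with
  | zero =>
    intro j i d lenAns ans last hfj _ _ _ _ _ _ _ _
    have hj : j = gems.length := by omega
    subst hj
    rw [List.drop_length]
    rfl
  | succ fuel ih =>
    intro j i d lenAns ans last hfj hij hnd hd hncov he hf hndl hl
    have hjn : j < gems.length := by omega
    have hj1n : j + 1 ≤ gems.length := hjn
    have hd' : pvCnt gems i (j+1)
        (if d.contains (gems.getD j "") then
          d.insert (gems.getD j "") (d.getD (gems.getD j "") 0 + 1)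
         else d.insert (gems.getD j "") 1) := pvCnt_add hjn hij hd
    have hnd' : (if d.contains (gems.getD j "") then
          d.insert (gems.getD j "") (d.getD (gems.getD j "") 0 + 1)
         else d.insert (gems.getD j "") 1).keys.Nodup := by
      by_cases h : d.contains (gems.getD j "") = true
      · rw [if_pos h]; exact PySem.Dict.nodup_keys_insert _ _ _ hnd
      · rw [if_neg h]; exact PySem.Dict.nodup_keys_insert _ _ _ hnd
    have hl' : pvLastInv gems (j+1) (last.insert (gems.getD j "") (j : Int)) := pvLastInv_step hl
    have hndl' : (last.insert (gems.getD j "") (j : Int)).keys.Nodup :=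
      PySem.Dict.nodup_keys_insert _ _ _ hndl
    have hdropj : gems.drop j = gems.getD j "" :: gems.drop (j+1) := by
      rw [List.drop_eq_getElem_cons hjn, List.getD_eq_getElem gems "" hjn]
    have hcast : (j : Int) + 1 = ((j+1 : Nat) : Int) := by push_cast; ring
    rw [hdropj, PySem.List.enumerate_cons, List.foldl_cons, hcast]
    by_cases hfull : pvCovers gems (gems.take (j+1))
    · -- all kinds occur among gems[0:j+1]
      have hszB : (last.insert (gems.getD j "") (j : Int)).size = (PySem.Set.ofList gems).length :=
        (pvLast_size_iff hj1n hndl' hl').2 hfull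
      have hvals_len : (last.insert (gems.getD j "") (j : Int)).values.length
          = (last.insert (gems.getD j "") (j : Int)).size := by
        simp [PySem.Dict.values, PySem.Dict.size]
      have hKpos : 0 < (PySem.Set.ofList gems).length := pvKindsPos hne
      have hvne : (last.insert (gems.getD j "") (j : Int)).values ≠ [] := by
        intro h
        have hlen0 : (last.insert (gems.getD j "") (j : Int)).size = 0 := by
          rw [← hvals_len, h]
          rfl
        rw [hszB] at hlen0
        omega
      obtain ⟨Lv, hLv⟩ : ∃ v, PySem.List.min? (last.insert (gems.getD j "") (j : Int)).values (fun y => y) = some v := by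
        rcases h : PySem.List.min? (last.insert (gems.getD j "") (j : Int)).values (fun y => y) with _ | v
        · exact absurd ((PySem.List.min?_eq_none_iff _ _).1 h) hvne
        · exact ⟨v, rfl⟩
      obtain ⟨pr, hpritems, hprv⟩ := List.mem_map.1 (show Lv ∈ (last.insert (gems.getD j "") (j : Int)).items.map (fun x => x.2) from by
        have hvm := PySem.List.min?_mem hLv
        simpa [PySem.Dict.values] using hvm)
      have hget0 : (last.insert (gems.getD j "") (j : Int)).get? pr.1 = some Lv := by
        have h0 := PySem.Dict.get?_of_mem_items (last.insert (gems.getD j "") (j : Int))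
          (show (pr.1, pr.2) ∈ _ from by rw [Prod.mk.eta]; exact hpritems) hndl'
        rw [h0, hprv]
      obtain ⟨LN, hLN, hLNcast⟩ : ∃ m, pvLast? gems (j+1) pr.1 = some m ∧ (m : Int) = Lv := by
        have h0 := hl' pr.1
        rw [hget0] at h0
        rcases h : pvLast? gems (j+1) pr.1 with _ | m
        · rw [h] at h0; simp at h0
        · rw [h] at h0
          simp at h0
          exact ⟨m, rfl, h0.symm⟩
      have hLv' : PySem.List.min? (last.insert (gems.getD j "") (j : Int)).values (fun y => y)
          = some ((LN : Int)) := by rw [hLv, ← hLNcast]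
      have hLNj : LN ≤ j := by
        have := (pvLast?_spec hj1n hLN).1
        omega
      have hub : ∀ k m, pvLast? gems (j+1) k = some m → LN ≤ m := by
        intro k m h
        have hg : (last.insert (gems.getD j "") (j : Int)).get? k = some ((m : Int)) := by
          rw [hl' k, h]
          rfl
        have hmemv : ((m : Int)) ∈ (last.insert (gems.getD j "") (j : Int)).values := by
          have hmi := PySem.Dict.mem_items_of_get?_eq_some _ hg
          simpa [PySem.Dict.values] using List.mem_map_of_mem (f := fun x : String × Int => x.2) hmi
        have hle := PySem.List.min?_isMin hLv _ hmemv
        simp only at hle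
        omega
      have hcovchar : ∀ m : Nat, pvCovers gems (pvWin gems m (j+1)) ↔ m ≤ LN := by
        intro m
        constructor
        · intro hc
          by_contra hm
          obtain ⟨_, hLNn, hgk0, _⟩ := pvLast?_spec hj1n hLN
          have hk0g : pr.1 ∈ gems := by
            rw [List.getD_eq_getElem gems "" hLNn] at hgk0
            exact hgk0 ▸ List.getElem_mem hLNn
          obtain ⟨idx, hidx1, hidx2, hidx3, hidx4⟩ := mem_pvWin.1 (hc pr.1 hk0g)
          have hmax := (pvLast?_spec hj1n hLN).2.2.2 idx hidx2 hidx4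
          omega
        · intro hm k hk
          have hkt : k ∈ gems.take (j+1) := hfull k hk
          rcases h : pvLast? gems (j+1) k with _ | o
          · exact absurd ((pvLast?_eq_none_iff hj1n).1 h) (by simp [hkt])
          · obtain ⟨ho1, ho2, ho3, _⟩ := pvLast?_spec hj1n h
            have hLo := hub k o h
            exact mem_pvWin.2 ⟨o, by omega, ho1, ho2, ho3⟩
      by_cases hiLN : i ≤ LN
      · -- the shrink loop runs from i up to LN
        obtain ⟨d'', hS, hnd'', hcnt''⟩ :=
          shrink_spec gems j LN hLNj hjn hcovchar (j+1) i _ lenAns ans hiLN (by omega) hnd' hd'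
        by_cases hc : lenAns > (j : Int) - (LN : Int) + 1
        · rw [if_pos hc] at hS
          have hB : solutionAltStep ((PySem.Set.ofList gems).length) (last, lenAns, ans)
                ((j : Int), gems.getD j "")
              = (last.insert (gems.getD j "") (j : Int),
                 (j : Int) - (LN : Int) + 1, [(LN : Int) + 1, (j : Int) + 1]) := by
            simp only [solutionAltStep]
            rw [if_pos hszB, hLv']
            dsimp only
            rw [if_pos (show (j : Int) - (LN : Int) + 1 < lenAns from hc)]
          rw [outer_step gems _ _ fuel i j d lenAns ans ⟨hij, hjn⟩, hS]
          dsimp only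
          rw [hB]
          refine ih (j+1) (LN+1) d'' ((j : Int) - (LN : Int) + 1) ([(LN : Int) + 1, (j : Int) + 1])
            (last.insert (gems.getD j "") (j : Int)) (by omega) (by omega) hnd'' hcnt''
            ?_ ?_ ?_ hndl' hl'
          · intro hcv
            have := (hcovchar (LN+1)).1 hcv
            omega
          · right
            have hsimp : LN + 1 - 1 = LN := by omega
            rw [hsimp]
            exact (hcovchar LN).2 (le_refl LN)
          · intro _
            push_cast
            omega
        · rw [if_neg hc] at hS
          have hB : solutionAltStep ((PySem.Set.ofList gems).length) (last, lenAns, ans)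
                ((j : Int), gems.getD j "")
              = (last.insert (gems.getD j "") (j : Int), lenAns, ans) := by
            simp only [solutionAltStep]
            rw [if_pos hszB, hLv']
            dsimp only
            rw [if_neg (show ¬ ((j : Int) - (LN : Int) + 1 < lenAns) from hc)]
          rw [outer_step gems _ _ fuel i j d lenAns ans ⟨hij, hjn⟩, hS]
          dsimp only
          rw [hB]
          refine ih (j+1) (LN+1) d'' lenAns ans
            (last.insert (gems.getD j "") (j : Int)) (by omega) (by omega) hnd'' hcnt''
            ?_ ?_ ?_ hndl' hl'
          · intro hcv
            have := (hcovchar (LN+1)).1 hcv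
            omega
          · right
            have hsimp : LN + 1 - 1 = LN := by omega
            rw [hsimp]
            exact (hcovchar LN).2 (le_refl LN)
          · intro _
            push_cast
            omega
      · -- the window does not reach back to gems[LN]: A does nothing and B cannot improve
        have hnc2 : ¬ pvCovers gems (pvWin gems i (j+1)) := fun hcv => hiLN ((hcovchar i).1 hcv)
        have hszA : ¬ ((if d.contains (gems.getD j "") then
              d.insert (gems.getD j "") (d.getD (gems.getD j "") 0 + 1)
             else d.insert (gems.getD j "") 1).size = (PySem.Set.ofList gems).length) :=
          fun h => hnc2 ((pvCnt_size_iff hnd' hd').1 h)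
        have hS := shrink_stop gems ((PySem.Set.ofList gems).length) j i _ lenAns ans hszA (j+1)
        have hi1 : 1 ≤ i := by omega
        have hecov : pvCovers gems (pvWin gems (i-1) j) := by
          rcases he with h | h
          · omega
          · exact h
        have hflen : lenAns ≤ (j : Int) - (i : Int) + 1 := hf (pvCovers_take hecov)
        have hi1LN : i - 1 ≤ LN := (hcovchar (i-1)).1 (pvCovers_mono hecov)
        have hnotimp : ¬ ((j : Int) - (LN : Int) + 1 < lenAns) := by
          have h2 : (LN : Int) + 1 ≤ (i : Int) := by exact_mod_cast (by omega : LN + 1 ≤ i)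
          omega
        have hB : solutionAltStep ((PySem.Set.ofList gems).length) (last, lenAns, ans)
              ((j : Int), gems.getD j "")
            = (last.insert (gems.getD j "") (j : Int), lenAns, ans) := by
          simp only [solutionAltStep]
          rw [if_pos hszB, hLv']
          dsimp only
          rw [if_neg hnotimp]
        rw [outer_step gems _ _ fuel i j d lenAns ans ⟨hij, hjn⟩, hS]
        dsimp only
        rw [hB]
        refine ih (j+1) i _ lenAns ans (last.insert (gems.getD j "") (j : Int))
          (by omega) (by omega) hnd' hd' hnc2 (Or.inr (pvCovers_mono hecov)) ?_ hndl' hl'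
        intro _
        push_cast
        omega
    · -- some kind is still missing from gems[0:j+1]: neither side changes the answer
      have hszB : ¬ ((last.insert (gems.getD j "") (j : Int)).size = (PySem.Set.ofList gems).length) :=
        fun h => hfull ((pvLast_size_iff hj1n hndl' hl').1 h)
      have hB : solutionAltStep ((PySem.Set.ofList gems).length) (last, lenAns, ans)
            ((j : Int), gems.getD j "")
          = (last.insert (gems.getD j "") (j : Int), lenAns, ans) := by
        simp only [solutionAltStep]
        rw [if_neg hszB]
      have hnc2 : ¬ pvCovers gems (pvWin gems i (j+1)) := fun hcv => hfull (pvCovers_take hcv)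
      have hszA : ¬ ((if d.contains (gems.getD j "") then
            d.insert (gems.getD j "") (d.getD (gems.getD j "") 0 + 1)
           else d.insert (gems.getD j "") 1).size = (PySem.Set.ofList gems).length) :=
        fun h => hnc2 ((pvCnt_size_iff hnd' hd').1 h)
      have hS := shrink_stop gems ((PySem.Set.ofList gems).length) j i _ lenAns ans hszA (j+1)
      rw [outer_step gems _ _ fuel i j d lenAns ans ⟨hij, hjn⟩, hS]
      dsimp only
      rw [hB]
      refine ih (j+1) i _ lenAns ans (last.insert (gems.getD j "") (j : Int))
        (by omega) (by omega) hnd' hd' hnc2 ?_ ?_ hndl' hl'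
      · rcases he with h | h
        · exact Or.inl h
        · exact Or.inr (pvCovers_mono h)
      · intro hcv
        exact absurd hcv hfull

-- ===== VERDICT (by name: the statement is the Claim_ definition above) =====
theorem solution_spec : Claim_equal_solution := by
  unfold Claim_equal_solution
  intro gems _
  unfold Spec_solution
  by_cases hne : gems = []
  · subst hne
    rfl
  · have hcnt0 : pvCnt gems 0 0 PySem.Dict.empty := by
      intro k
      simp [pvWin, PySem.Dict.get?_empty]
    have hncov0 : ¬ pvCovers gems (pvWin gems 0 0) := by
      intro hcv
      cases gems with
      | nil => exact hne rfl
      | cons g t =>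
        have hmem := hcv g List.mem_cons_self
        simp [pvWin] at hmem
    have hf0 : pvCovers gems (gems.take 0) → ((gems.length : Int) + 1) ≤ (0 : Int) - (0 : Int) + 1 := by
      intro hcv
      exfalso
      cases gems with
      | nil => exact hne rfl
      | cons g t =>
        have hmem := hcv g List.mem_cons_self
        simp at hmem
    have hl0 : pvLastInv gems 0 PySem.Dict.empty := by
      intro k
      simp [pvLast?, PySem.Dict.get?_empty]
    have h := outer_main gems hne gems.length 0 0 PySem.Dict.empty ((gems.length : Int) + 1) []
      PySem.Dict.empty (Nat.add_zero _) (le_refl 0) PySem.Dict.nodup_keys_empty hcnt0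
      hncov0 (Or.inl rfl) hf0 PySem.Dict.nodup_keys_empty hl0
    rw [List.drop_zero] at h
    exact h
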